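-- pv_equiv track=rewrite | github.com/Vagacoder/Codesignal | python/Arcade/Core/C110PolygonPerimeter.py | polygonPerimeter
-- ===== SOURCE A (Python) =====
-- def polygonPerimeter(matrix: list)-> int:
--     n = len(matrix)
--     m = len(matrix[0])
--     counts = 0
--     for i in range(n):
--         for j in range(m):
--             if matrix[i][j]:
--                 # * check up
--                 if i == 0:
--                     counts += 1
--                 elif not matrix[i-1][j]:
--                     counts += 1
--                 # * check down
--                 if i == n-1:
--                     counts += 1
--                 elif not matrix[i+1][j]:
--                     counts += 1
--                 # * check left
--                 if j == 0:
--                     counts += 1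
--                 elif not matrix[i][j-1]:
--                     counts += 1
--                 if j == m-1:
--                     counts += 1
--                 elif not matrix[i][j+1]:
--                     counts += 1
--
--     return counts
-- ===== SOURCE B (Python) =====
-- def polygonPerimeter(matrix: list) -> int:
--     # one pass: 4 per filled cell, minus 2 per shared right/down edge
--     m = len(matrix[0])
--     cells = 0
--     edges = 0
--     for i, row in enumerate(matrix):
--         for j in range(m):
--             if row[j]:
--                 cells += 1
--                 if j + 1 < m and row[j + 1]:
--                     edges += 1
--                 if i + 1 < len(matrix) and matrix[i + 1][j]:
--                     edges += 1
--     return 4 * cells - 2 * edges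
-- ===== Notes on version B (the rewrite author's own statement) =====
-- stated objective: alternative
-- what changed: Replaces the four per-cell boundary/neighbor checks (up/down/left/right) by the identity perimeter = 4*cells - 2*shared_edges, counting in one pass only each filled cell and its right/down filled neighbors.
import Mathlib
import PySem

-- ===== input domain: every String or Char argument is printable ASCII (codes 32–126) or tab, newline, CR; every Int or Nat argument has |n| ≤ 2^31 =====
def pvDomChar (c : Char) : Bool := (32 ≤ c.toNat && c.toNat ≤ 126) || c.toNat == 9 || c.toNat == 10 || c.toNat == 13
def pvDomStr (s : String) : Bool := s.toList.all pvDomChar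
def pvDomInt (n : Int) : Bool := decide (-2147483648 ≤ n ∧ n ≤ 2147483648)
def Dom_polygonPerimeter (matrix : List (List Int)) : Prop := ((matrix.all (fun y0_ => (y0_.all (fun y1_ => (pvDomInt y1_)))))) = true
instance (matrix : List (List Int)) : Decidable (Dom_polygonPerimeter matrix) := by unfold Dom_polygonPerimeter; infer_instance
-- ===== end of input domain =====

-- B is an alternative same-cost algorithm: perimeter = 4*cells − 2*shared right/down edges, instead of A's four per-cell side checks.

-- ===== PORT A =====
-- literal transliteration of A: nested index loops, four boundary/neighbor checks per filled cell
def polygonPerimeter (matrix : List (List Int)) : Int :=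
  let n : Int := matrix.length
  let m : Int := (PySem.List.pyGetD matrix 0 []).length
  (PySem.List.pyRange 0 n 1).foldl (fun counts i =>
    (PySem.List.pyRange 0 m 1).foldl (fun counts j =>
      if PySem.List.pyGetD (PySem.List.pyGetD matrix i []) j 0 ≠ 0 then
        counts
        + (if i = 0 then 1 else if PySem.List.pyGetD (PySem.List.pyGetD matrix (i-1) []) j 0 = 0 then 1 else 0)
        + (if i = n-1 then 1 else if PySem.List.pyGetD (PySem.List.pyGetD matrix (i+1) []) j 0 = 0 then 1 else 0)
        + (if j = 0 then 1 else if PySem.List.pyGetD (PySem.List.pyGetD matrix i []) (j-1) 0 = 0 then 1 else 0)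
        + (if j = m-1 then 1 else if PySem.List.pyGetD (PySem.List.pyGetD matrix i []) (j+1) 0 = 0 then 1 else 0)
      else counts) counts) 0

-- ===== PORT B =====
-- literal transliteration of Source B: enumerate rows, count filled cells and shared right/down edges
def polygonPerimeter_alt (matrix : List (List Int)) : Int :=
  let m : Int := (PySem.List.pyGetD matrix 0 []).length
  let st : Int × Int := (PySem.List.enumerate matrix 0).foldl (fun (st : Int × Int) p =>
    (PySem.List.pyRange 0 m 1).foldl (fun (st : Int × Int) j =>
      if PySem.List.pyGetD p.2 j 0 ≠ 0 then
        (st.1 + 1,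
         st.2
         + (if j + 1 < m ∧ PySem.List.pyGetD p.2 (j+1) 0 ≠ 0 then 1 else 0)
         + (if p.1 + 1 < (matrix.length : Int) ∧ PySem.List.pyGetD (PySem.List.pyGetD matrix (p.1+1) []) j 0 ≠ 0 then 1 else 0))
      else st) st) (0, 0)
  4 * st.1 - 2 * st.2

-- ===== PRECONDITION & SPEC =====
-- Pre_ excludes the empty matrix (A raises IndexError on matrix[0]) and matrices with a row
-- shorter than the first row (A raises IndexError reading row[j] for some j < len(matrix[0])).
def Pre_polygonPerimeter (matrix : List (List Int)) : Prop :=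
  matrix ≠ [] ∧ ∀ row ∈ matrix, (matrix.headD []).length ≤ row.length
instance (matrix : List (List Int)) : Decidable (Pre_polygonPerimeter matrix) := by unfold Pre_polygonPerimeter; infer_instance

def pvWitness_polygonPerimeter : List (List Int) := [[1, 0], [1, 1]]

def Spec_polygonPerimeter (matrix : List (List Int)) (out : Int) : Prop := out = polygonPerimeter_alt matrix
instance (matrix : List (List Int)) (out : Int) : Decidable (Spec_polygonPerimeter matrix out) := by unfold Spec_polygonPerimeter; infer_instance

-- ===== CLAIM (what is proved, stated in full; the proofs are below) =====
def Claim_equal_polygonPerimeter : Prop := ∀ (matrix : List (List Int)), Dom_polygonPerimeter matrix → Pre_polygonPerimeter matrix → Spec_polygonPerimeter matrix (polygonPerimeter matrix)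
-- ===== LEMMAS AND PROOFS =====

-- cell predicate: in-bounds (within the first row's width) and truthy
def pvF (mx : List (List Int)) (i j : Nat) : Bool :=
  decide (i < mx.length ∧ j < (mx.getD 0 []).length ∧ (mx.getD i []).getD j 0 ≠ 0)

def pvRowSum (M : Nat) (g : Nat → Int) : Int := ((List.range M).map g).sum

def pvAterm (mx : List (List Int)) (i j : Nat) : Int :=
  if pvF mx i j then
    (if 0 < i ∧ pvF mx (i-1) j then (0:Int) else 1)
      + (if pvF mx (i+1) j then (0:Int) else 1)
      + (if 0 < j ∧ pvF mx i (j-1) then (0:Int) else 1)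
      + (if pvF mx i (j+1) then (0:Int) else 1)
  else 0

def pvBcell (mx : List (List Int)) (i j : Nat) : Int := if pvF mx i j then 1 else 0
def pvER (mx : List (List Int)) (i j : Nat) : Int := if pvF mx i j ∧ pvF mx i (j+1) then 1 else 0
def pvED (mx : List (List Int)) (i j : Nat) : Int := if pvF mx i j ∧ pvF mx (i+1) j then 1 else 0
def pvEL (mx : List (List Int)) (i j : Nat) : Int := if 0 < j ∧ pvF mx i (j-1) ∧ pvF mx i j then 1 else 0
def pvEU (mx : List (List Int)) (i j : Nat) : Int := if 0 < i ∧ pvF mx (i-1) j ∧ pvF mx i j then 1 else 0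

lemma pvRowSum_succ (M : Nat) (g : Nat → Int) : pvRowSum (M+1) g = pvRowSum M g + g M := by
  simp [pvRowSum, List.range_succ]

lemma pvRowSum_congr {M : Nat} {g h : Nat → Int} (H : ∀ j, j < M → g j = h j) :
    pvRowSum M g = pvRowSum M h := by
  induction M with
  | zero => simp [pvRowSum]
  | succ k ih =>
    rw [pvRowSum_succ, pvRowSum_succ, ih (fun j hj => H j (by omega)), H k (by omega)]

lemma pvRowSum_const0 (M : Nat) : pvRowSum M (fun _ => (0:Int)) = 0 := by
  simp [pvRowSum]

lemma pvRowSum_add (M : Nat) (g h : Nat → Int) :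
    pvRowSum M (fun j => g j + h j) = pvRowSum M g + pvRowSum M h := by
  induction M with
  | zero => simp [pvRowSum]
  | succ k ih => simp only [pvRowSum_succ, ih]; ring

lemma pvShift (M : Nat) (G : Nat → Int) (h : ∀ j, M ≤ j + 1 → G j = 0) :
    pvRowSum M (fun j => if 0 < j then G (j-1) else 0) = pvRowSum M G := by
  cases M with
  | zero => simp [pvRowSum]
  | succ k =>
    have hL : pvRowSum (k+1) (fun j => if 0 < j then G (j-1) else 0) = pvRowSum k G := by
      simp [pvRowSum, List.range_succ_eq_map, List.map_map, Function.comp_def, Nat.succ_eq_add_one]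
    rw [hL, pvRowSum_succ, h k (by omega), add_zero]

lemma pvFoldlAdd {α : Type} (l : List α) (f : Int → α → Int) (g : α → Int)
    (h : ∀ a, ∀ x ∈ l, f a x = a + g x) (a : Int) : l.foldl f a = a + (l.map g).sum := by
  induction l generalizing a with
  | nil => simp
  | cons x t ih =>
    rw [List.foldl_cons, h a x (List.mem_cons_self), ih (fun b y hy => h b y (List.mem_cons_of_mem x hy))]
    simp [add_assoc]

lemma pvFoldlPair {α : Type} (l : List α) (f : Int × Int → α → Int × Int) (g e : α → Int)
    (h : ∀ p : Int × Int, ∀ x ∈ l, f p x = (p.1 + g x, p.2 + e x)) (p : Int × Int) :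
    l.foldl f p = (p.1 + (l.map g).sum, p.2 + (l.map e).sum) := by
  induction l generalizing p with
  | nil => simp
  | cons x t ih =>
    rw [List.foldl_cons, h p x (List.mem_cons_self), ih (fun q y hy => h q y (List.mem_cons_of_mem x hy))]
    simp [add_assoc]

lemma pvA_up (mx : List (List Int)) (i j : Nat) (hi : i < mx.length)
    (hj : j < (mx.getD 0 []).length) :
    (if (i:Int) = 0 then (1:Int)
     else if PySem.List.pyGetD (PySem.List.pyGetD mx ((i:Int) - 1) []) (j:Int) 0 = 0 then 1 else 0)
      = (if 0 < i ∧ pvF mx (i-1) j then 0 else 1) := by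
  cases i with
  | zero => simp
  | succ k =>
    have e1 : (((k+1 : Nat)):Int) - 1 = (k:Int) := by push_cast; ring
    simp only [e1, PySem.List.pyGetD_natCast, Nat.cast_eq_zero]
    have hk : k < mx.length := Nat.lt_of_succ_lt hi
    by_cases hc : (mx.getD k []).getD j 0 = 0 <;> simp_all [pvF]

lemma pvA_down (mx : List (List Int)) (i j : Nat) (hi : i < mx.length)
    (hj : j < (mx.getD 0 []).length) :
    (if (i:Int) = (mx.length:Int) - 1 then (1:Int)
     else if PySem.List.pyGetD (PySem.List.pyGetD mx ((i:Int) + 1) []) (j:Int) 0 = 0 then 1 else 0)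
      = (if pvF mx (i+1) j then 0 else 1) := by
  by_cases he : i + 1 = mx.length
  · rw [if_pos (by omega)]
    have hF : pvF mx (i+1) j = false := by
      simp only [pvF, decide_eq_false_iff_not]
      rintro ⟨h1, -⟩
      omega
    simp [hF]
  · have e1 : ((i:Int) + 1) = (((i+1 : Nat)):Int) := by push_cast; ring
    rw [if_neg (by omega), e1]
    simp only [PySem.List.pyGetD_natCast]
    have hk : i + 1 < mx.length := by omega
    by_cases hc : (mx.getD (i+1) []).getD j 0 = 0 <;> simp_all [pvF]

lemma pvA_left (mx : List (List Int)) (i j : Nat) (hi : i < mx.length)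
    (hj : j < (mx.getD 0 []).length) :
    (if (j:Int) = 0 then (1:Int)
     else if PySem.List.pyGetD (PySem.List.pyGetD mx (i:Int) []) ((j:Int) - 1) 0 = 0 then 1 else 0)
      = (if 0 < j ∧ pvF mx i (j-1) then 0 else 1) := by
  cases j with
  | zero => simp
  | succ k =>
    have e1 : (((k+1 : Nat)):Int) - 1 = (k:Int) := by push_cast; ring
    simp only [e1, PySem.List.pyGetD_natCast, Nat.cast_eq_zero]
    have hk : k < (mx.getD 0 []).length := Nat.lt_of_succ_lt hj
    by_cases hc : (mx.getD i []).getD k 0 = 0 <;> simp_all [pvF]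

lemma pvA_right (mx : List (List Int)) (i j : Nat) (hi : i < mx.length)
    (hj : j < (mx.getD 0 []).length) :
    (if (j:Int) = ((mx.getD 0 []).length:Int) - 1 then (1:Int)
     else if PySem.List.pyGetD (PySem.List.pyGetD mx (i:Int) []) ((j:Int) + 1) 0 = 0 then 1 else 0)
      = (if pvF mx i (j+1) then 0 else 1) := by
  by_cases he : j + 1 = (mx.getD 0 []).length
  · rw [if_pos (by omega)]
    have hF : pvF mx i (j+1) = false := by
      simp only [pvF, decide_eq_false_iff_not]
      rintro ⟨-, h1, -⟩
      omega
    simp [hF]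
  · have e1 : ((j:Int) + 1) = (((j+1 : Nat)):Int) := by push_cast; ring
    rw [if_neg (by omega), e1]
    simp only [PySem.List.pyGetD_natCast]
    have hk : j + 1 < (mx.getD 0 []).length := by omega
    by_cases hc : (mx.getD i []).getD (j+1) 0 = 0 <;> simp_all [pvF]

lemma pvA_eq (mx : List (List Int)) :
    polygonPerimeter mx
      = pvRowSum mx.length (fun i => pvRowSum (mx.getD 0 []).length (fun j => pvAterm mx i j)) := by
  simp only [polygonPerimeter, PySem.List.pyGetD_zero, PySem.List.pyRange_zero_nat,
    List.foldl_map]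
  rw [pvFoldlAdd (List.range mx.length) _
      (fun i => pvRowSum (mx.getD 0 []).length (fun j => pvAterm mx i j)) ?_ 0, zero_add]
  · rfl
  intro a i hi
  rw [pvFoldlAdd (List.range (mx.getD 0 []).length) _ (fun j => pvAterm mx i j) ?_ a]
  · rfl
  intro b j hj
  have hiN : i < mx.length := List.mem_range.mp hi
  have hjM : j < (mx.getD 0 []).length := List.mem_range.mp hj
  rw [pvA_up mx i j hiN hjM, pvA_down mx i j hiN hjM, pvA_left mx i j hiN hjM,
      pvA_right mx i j hiN hjM]
  simp only [PySem.List.pyGetD_natCast]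
  by_cases hc : (mx.getD i []).getD j 0 = 0
  · rw [if_neg (not_not_intro hc)]
    have hF : pvF mx i j = false := by simp_all [pvF]
    simp [pvAterm, hF]
  · rw [if_pos hc]
    have hF : pvF mx i j = true := by simp_all [pvF]
    simp only [pvAterm, hF, if_true]
    ring

lemma pvB_eq (mx : List (List Int)) :
    polygonPerimeter_alt mx
      = 4 * pvRowSum mx.length (fun i => pvRowSum (mx.getD 0 []).length (fun j => pvBcell mx i j))
        - 2 * pvRowSum mx.length (fun i => pvRowSum (mx.getD 0 []).length
            (fun j => pvER mx i j + pvED mx i j)) := by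
  simp only [polygonPerimeter_alt, PySem.List.pyGetD_zero, PySem.List.enumerate_eq_map_pyRange _ ([] : List Int),
    PySem.List.len_eq, PySem.List.pyRange_zero_nat, List.foldl_map]
  rw [pvFoldlPair (List.range mx.length) _
      (fun i => pvRowSum (mx.getD 0 []).length (fun j => pvBcell mx i j))
      (fun i => pvRowSum (mx.getD 0 []).length (fun j => pvER mx i j + pvED mx i j)) ?_ (0, 0)]
  · simp [pvRowSum]
  intro p i hi
  simp only [PySem.List.pyGetD_natCast]
  rw [pvFoldlPair (List.range (mx.getD 0 []).length) _
      (fun j => pvBcell mx i j) (fun j => pvER mx i j + pvED mx i j) ?_ p]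
  · rfl
  intro q j hj
  have hiN : i < mx.length := List.mem_range.mp hi
  have hjM : j < (mx.getD 0 []).length := List.mem_range.mp hj
  by_cases hc : (mx.getD i []).getD j 0 = 0
  · have hF : pvF mx i j = false := by simp_all [pvF]
    rw [if_neg (not_not_intro hc)]
    have hB : pvBcell mx i j = 0 := by simp [pvBcell, hF]
    have hR : pvER mx i j = 0 := by simp [pvER, hF]
    have hD : pvED mx i j = 0 := by simp [pvED, hF]
    simp [hB, hR, hD]
  · have hF : pvF mx i j = true := by simp_all [pvF]
    rw [if_pos hc]
    have hB : pvBcell mx i j = 1 := by simp [pvBcell, hF]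
    have ej : ((j:Int) + 1) = (((j+1 : Nat)):Int) := by push_cast; ring
    have ei : ((i:Int) + 1) = (((i+1 : Nat)):Int) := by push_cast; ring
    have hR : (if ((j:Int) + 1 < ((mx.getD 0 []).length : Int) ∧
          PySem.List.pyGetD (mx.getD i []) ((j:Int) + 1) 0 ≠ 0) then (1:Int) else 0)
        = pvER mx i j := by
      simp only [ej, PySem.List.pyGetD_natCast, Nat.cast_lt]
      by_cases h1 : j + 1 < (mx.getD 0 []).length
      · by_cases h2 : (mx.getD i []).getD (j+1) 0 = 0 <;> simp_all [pvER, pvF]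
      · simp_all [pvER, pvF]
    have hD : (if ((i:Int) + 1 < (mx.length : Int) ∧
          (PySem.List.pyGetD mx ((i:Int) + 1) []).getD j 0 ≠ 0) then (1:Int) else 0)
        = pvED mx i j := by
      simp only [ei, PySem.List.pyGetD_natCast, Nat.cast_lt]
      by_cases h1 : i + 1 < mx.length
      · by_cases h2 : (mx.getD (i+1) []).getD j 0 = 0 <;> simp_all [pvED, pvF]
      · simp_all [pvED, pvF]
    rw [hR, hD]
    exact Prod.ext (by simp [hB]) (by simp; ring)

lemma pvAterm_split (mx : List (List Int)) (i j : Nat) :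
    pvAterm mx i j = 4 * pvBcell mx i j - pvEU mx i j - pvED mx i j - pvEL mx i j - pvER mx i j := by
  by_cases h : pvF mx i j = true
  · simp only [pvAterm, pvBcell, pvEU, pvED, pvEL, pvER, h, if_true, true_and, and_true]
    split_ifs <;> norm_num
  · have h' : pvF mx i j = false := by simpa using h
    simp [pvAterm, pvBcell, pvEU, pvED, pvEL, pvER, h']

lemma pvF_bound {mx : List (List Int)} {i j : Nat} (h : pvF mx i j = true) :
    i < mx.length ∧ j < (mx.getD 0 []).length := by
  simp only [pvF, decide_eq_true_eq] at h
  exact ⟨h.1, h.2.1⟩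

lemma pvRowSum_lin (M : Nat) (c u d l r : Nat → Int) :
    pvRowSum M (fun j => 4 * c j - u j - d j - l j - r j)
      = 4 * pvRowSum M c - pvRowSum M u - pvRowSum M d - pvRowSum M l - pvRowSum M r := by
  induction M with
  | zero => simp [pvRowSum]
  | succ k ih => simp only [pvRowSum_succ, ih]; ring

lemma pvRow_LR (mx : List (List Int)) (i : Nat) :
    pvRowSum (mx.getD 0 []).length (fun j => pvEL mx i j)
      = pvRowSum (mx.getD 0 []).length (fun j => pvER mx i j) := by
  have h1 : ∀ j, pvEL mx i j = (if 0 < j then pvER mx i (j-1) else 0) := by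
    intro j
    cases j with
    | zero => simp [pvEL]
    | succ k => simp [pvEL, pvER]
  rw [pvRowSum_congr (fun j _ => h1 j)]
  exact pvShift _ _ (fun k hk => by
    simp only [pvER]
    rw [if_neg]
    rintro ⟨-, h2⟩
    exact absurd (pvF_bound h2).2 (by omega))

lemma pvCol_UD (mx : List (List Int)) :
    pvRowSum mx.length (fun i => pvRowSum (mx.getD 0 []).length (fun j => pvEU mx i j))
      = pvRowSum mx.length (fun i => pvRowSum (mx.getD 0 []).length (fun j => pvED mx i j)) := by
  have h1 : ∀ i, pvRowSum (mx.getD 0 []).length (fun j => pvEU mx i j)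
      = (if 0 < i then pvRowSum (mx.getD 0 []).length (fun j => pvED mx (i-1) j) else 0) := by
    intro i
    cases i with
    | zero =>
      have h0 : ∀ j, pvEU mx 0 j = 0 := fun j => by simp [pvEU]
      rw [pvRowSum_congr (fun j hj => h0 j), pvRowSum_const0]
      simp
    | succ k =>
      rw [if_pos (Nat.succ_pos k)]
      exact pvRowSum_congr (fun j _ => by simp [pvEU, pvED])
  rw [pvRowSum_congr (fun i _ => h1 i)]
  refine pvShift mx.length (fun i => pvRowSum (mx.getD 0 []).length (fun j => pvED mx i j))
    (fun k hk => ?_)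
  have h0 : ∀ j, pvED mx k j = 0 := fun j => by
    simp only [pvED]
    rw [if_neg]
    rintro ⟨-, h2⟩
    exact absurd (pvF_bound h2).1 (by omega)
  show pvRowSum (mx.getD 0 []).length (fun j => pvED mx k j) = 0
  rw [pvRowSum_congr (fun j hj => h0 j), pvRowSum_const0]

lemma pvMain (mx : List (List Int)) : polygonPerimeter mx = polygonPerimeter_alt mx := by
  rw [pvA_eq, pvB_eq]
  have hin : ∀ i, pvRowSum (mx.getD 0 []).length (fun j => pvAterm mx i j)
      = 4 * pvRowSum (mx.getD 0 []).length (fun j => pvBcell mx i j)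
        - pvRowSum (mx.getD 0 []).length (fun j => pvEU mx i j)
        - pvRowSum (mx.getD 0 []).length (fun j => pvED mx i j)
        - pvRowSum (mx.getD 0 []).length (fun j => pvEL mx i j)
        - pvRowSum (mx.getD 0 []).length (fun j => pvER mx i j) := fun i => by
    rw [pvRowSum_congr (fun j _ => pvAterm_split mx i j)]
    exact pvRowSum_lin _ _ _ _ _ _
  rw [pvRowSum_congr (fun i _ => hin i),
      pvRowSum_lin mx.length
        (fun i => pvRowSum (mx.getD 0 []).length (fun j => pvBcell mx i j))
        (fun i => pvRowSum (mx.getD 0 []).length (fun j => pvEU mx i j))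
        (fun i => pvRowSum (mx.getD 0 []).length (fun j => pvED mx i j))
        (fun i => pvRowSum (mx.getD 0 []).length (fun j => pvEL mx i j))
        (fun i => pvRowSum (mx.getD 0 []).length (fun j => pvER mx i j)),
      pvCol_UD mx, pvRowSum_congr (fun i _ => pvRow_LR mx i),
      pvRowSum_congr (fun i _ =>
        pvRowSum_add (mx.getD 0 []).length (fun j => pvER mx i j) (fun j => pvED mx i j)),
      pvRowSum_add mx.length
        (fun i => pvRowSum (mx.getD 0 []).length (fun j => pvER mx i j))
        (fun i => pvRowSum (mx.getD 0 []).length (fun j => pvED mx i j))]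
  ring


-- ===== VERDICT (by name: the statement is the Claim_ definition above) =====
theorem polygonPerimeter_spec : Claim_equal_polygonPerimeter := by
  intro mx _ _; exact (pvMain mx).symm ▸ rfl
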